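-- pv_equiv track=rewrite | github.com/YassineBibrine/Fire-Scout | src/mapping/mapping/tf_consistency.py | is_tf_consistent
-- ===== SOURCE A (Python) =====
-- def is_tf_consistent(edges, root='map'):
--     """Validate a tree-like TF graph represented as parent->child edge tuples."""
--     children = {}
--     nodes = {root}
--     for parent, child in edges:
--         nodes.add(parent)
--         nodes.add(child)
--         children.setdefault(parent, []).append(child)
--
--     visiting = set()
--     visited = set()
--
--     def dfs(node):
--         if node in visiting:
--             return False
--         if node in visited:
--             return True
--         visiting.add(node)
--         for child in children.get(node, []):
--             if not dfs(child):
--                 return False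
--         visiting.remove(node)
--         visited.add(node)
--         return True
--
--     if not dfs(root):
--         return False
--
--     return nodes.issubset(visited)
-- ===== SOURCE B (Python) =====
-- def is_tf_consistent(edges, root='map'):
--     """Validate a tree-like TF graph represented as parent->child edge tuples.
--
--     Re-implementation: instead of a recursive three-colour DFS, compute the
--     set reachable from root by bounded fixpoint saturation, then declare the
--     graph consistent iff every node is reachable and no reachable node can
--     reach itself again (no cycle in the reachable part).
--     """
--     children = {}
--     nodes = {root}
--     for parent, child in edges:
--         nodes.add(parent)
--         nodes.add(child)
--         children.setdefault(parent, []).append(child)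
--
--     def closure(seed):
--         reach = set(seed)
--         for _ in range(len(edges) + 1):
--             new = {c for n in reach for c in children.get(n, []) if c not in reach}
--             if not new:
--                 break
--             reach |= new
--         return reach
--
--     reach = closure([root])
--     if not nodes.issubset(reach):
--         return False
--     return all(n not in closure(children.get(n, [])) for n in reach)
-- ===== Notes on version B (the rewrite author's own statement) =====
-- stated objective: alternative
-- what changed: Replaces A's recursive three-colour DFS (visiting/visited sets with back-edge detection) by an iterative fixpoint saturation that computes the set reachable from root, declaring the graph consistent iff every node is reachable and no reachable node can reach itself; trades the linear recursive traversal for loop-based set closure computations (no recursion, quadratic in the worst case).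
import Mathlib
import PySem

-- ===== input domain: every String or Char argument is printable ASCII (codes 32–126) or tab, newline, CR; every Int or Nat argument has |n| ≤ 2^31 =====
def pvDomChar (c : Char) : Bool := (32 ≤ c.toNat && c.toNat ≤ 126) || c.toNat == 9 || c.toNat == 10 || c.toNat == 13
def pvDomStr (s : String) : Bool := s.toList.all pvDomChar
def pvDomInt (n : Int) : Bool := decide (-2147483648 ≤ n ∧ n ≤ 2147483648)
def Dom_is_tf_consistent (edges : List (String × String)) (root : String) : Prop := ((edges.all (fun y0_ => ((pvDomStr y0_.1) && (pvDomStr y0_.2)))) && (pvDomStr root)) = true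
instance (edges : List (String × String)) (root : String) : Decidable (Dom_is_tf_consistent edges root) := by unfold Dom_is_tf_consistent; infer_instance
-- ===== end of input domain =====

-- B replaces A's recursive three-colour DFS by reachable-set saturation plus a
-- per-node self-reachability test (objective: alternative algorithm; not faster).

-- ===== PORT A =====
-- the first loop: nodes = {root} grown with both endpoints; children built with
-- setdefault(parent, []).append(child) (= Dict.modify parent [] (· ++ [child]))
def pvBuildA (edges : List (String × String)) (root : String) :
    PySem.Set String × PySem.Dict String (List String) :=
  edges.foldl
    (fun st e =>
      (PySem.Set.add (PySem.Set.add st.1 e.1) e.2,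
       st.2.modify e.1 [] (fun l => l ++ [e.2])))
    (PySem.Set.ofList [root], PySem.Dict.empty)

-- the recursive dfs, with (visiting, visited) threaded as state.  Python's
-- recursion has no fuel; the port takes fuel 2*len(edges)+2, which is proved
-- below (pvDfsA_spec + pvU_card_lt) to exceed the recursion depth on every
-- input, so the fuel-0 branch is never taken.  visiting.remove(node) is ported
-- as Set.discard: the node was just added, so Python's set.remove cannot raise.
mutual
def pvDfsA (ch : PySem.Dict String (List String)) (fuel : Nat)
    (vg vd : PySem.Set String) (n : String) :
    Bool × PySem.Set String × PySem.Set String :=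
  match fuel with
  | 0 => (false, vg, vd)
  | fuel + 1 =>
    if PySem.Set.contains vg n then (false, vg, vd)
    else if PySem.Set.contains vd n then (true, vg, vd)
    else
      match pvDfsListA ch fuel (PySem.Set.add vg n) vd (ch.getD n []) with
      | (false, vg2, vd2) => (false, vg2, vd2)
      | (true, vg2, vd2) => (true, PySem.Set.discard vg2 n, PySem.Set.add vd2 n)
termination_by (fuel, 0)

def pvDfsListA (ch : PySem.Dict String (List String)) (fuel : Nat)
    (vg vd : PySem.Set String) (cs : List String) :
    Bool × PySem.Set String × PySem.Set String :=
  match cs with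
  | [] => (true, vg, vd)
  | c :: cs =>
    match pvDfsA ch fuel vg vd c with
    | (false, vg2, vd2) => (false, vg2, vd2)
    | (true, vg2, vd2) => pvDfsListA ch fuel vg2 vd2 cs
termination_by (fuel, cs.length + 1)
end

def is_tf_consistent (edges : List (String × String)) (root : String) : Bool :=
  let nc := pvBuildA edges root
  let r := pvDfsA nc.2 (2 * edges.length + 2) PySem.Set.empty PySem.Set.empty root
  if r.1 then PySem.Set.issubset nc.1 r.2.2 else false

-- ===== PORT B =====
-- same first loop as in Source B
def pvBuildB (edges : List (String × String)) (root : String) :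
    PySem.Set String × PySem.Dict String (List String) :=
  edges.foldl
    (fun st e =>
      (PySem.Set.add (PySem.Set.add st.1 e.1) e.2,
       st.2.modify e.1 [] (fun l => l ++ [e.2])))
    (PySem.Set.ofList [root], PySem.Dict.empty)

-- closure(seed): bounded saturation loop 'for _ in range(len(edges)+1)' with break
def pvClosureB (ch : PySem.Dict String (List String)) :
    Nat → PySem.Set String → PySem.Set String
  | 0, reach => reach
  | fuel + 1, reach =>
    let nw : PySem.Set String :=
      PySem.Set.ofList
        ((reach.flatMap (fun n => ch.getD n [])).filter
          (fun c => !(PySem.Set.contains reach c)))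
    if nw.isEmpty then reach else pvClosureB ch fuel (PySem.Set.union reach nw)

def is_tf_consistent_alt (edges : List (String × String)) (root : String) : Bool :=
  let nc := pvBuildB edges root
  let reach := pvClosureB nc.2 (edges.length + 1) (PySem.Set.ofList [root])
  if !(PySem.Set.issubset nc.1 reach) then false
  else reach.all (fun n =>
    !(PySem.Set.contains
        (pvClosureB nc.2 (edges.length + 1) (PySem.Set.ofList (nc.2.getD n []))) n))

-- ===== PRECONDITION & SPEC =====
def Spec_is_tf_consistent (edges : List (String × String)) (root : String) (out : Bool) : Prop := out = is_tf_consistent_alt edges root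
instance (edges : List (String × String)) (root : String) (out : Bool) : Decidable (Spec_is_tf_consistent edges root out) := by unfold Spec_is_tf_consistent; infer_instance

-- ===== CLAIM (what is proved, stated in full; the proofs are below) =====
def Claim_equal_is_tf_consistent : Prop := ∀ (edges : List (String × String)) (root : String), Dom_is_tf_consistent edges root → Spec_is_tf_consistent edges root (is_tf_consistent edges root)

-- ===== LEMMAS AND PROOFS =====

-- edge relation, reachability, universe of node names
def pvStep (edges : List (String × String)) (a b : String) : Prop := (a, b) ∈ edges
def pvReach (edges : List (String × String)) : String → String → Prop :=
  Relation.ReflTransGen (pvStep edges)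
def pvCyc (edges : List (String × String)) (x : String) : Prop :=
  Relation.TransGen (pvStep edges) x x
def pvU (edges : List (String × String)) (root : String) : Finset String :=
  (root :: edges.flatMap (fun e => [e.1, e.2])).toFinset

theorem pvBuildA_eq (edges : List (String × String)) (root : String) :
    pvBuildA edges root =
      (edges.foldl (fun s e => PySem.Set.add (PySem.Set.add s e.1) e.2)
        (PySem.Set.ofList [root]),
       edges.foldl (fun d e => d.modify e.1 [] (fun l => l ++ [e.2])) PySem.Dict.empty) := by
  unfold pvBuildA
  have h : ∀ (l : List (String × String)) (s : PySem.Set String)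
      (d : PySem.Dict String (List String)),
      l.foldl (fun st e => (PySem.Set.add (PySem.Set.add st.1 e.1) e.2,
          st.2.modify e.1 [] (fun l => l ++ [e.2]))) (s, d) =
        (l.foldl (fun s e => PySem.Set.add (PySem.Set.add s e.1) e.2) s,
         l.foldl (fun d e => d.modify e.1 [] (fun l => l ++ [e.2])) d) := by
    intro l
    induction l with
    | nil => intro s d; rfl
    | cons e l ih => intro s d; simp only [List.foldl_cons, ih]
  exact h edges _ _

theorem pvBuildA_snd_getD (edges : List (String × String)) (root : String) (a : String) :
    (pvBuildA edges root).2.getD a [] =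
      (edges.filter (fun e => e.1 == a)).map (fun e => e.2) := by
  rw [pvBuildA_eq]
  simpa using PySem.Dict.getD_foldl_modify_append edges PySem.Dict.empty a

theorem pvMem_children (edges : List (String × String)) (root : String) (a b : String) :
    b ∈ (pvBuildA edges root).2.getD a [] ↔ (a, b) ∈ edges := by
  rw [pvBuildA_snd_getD]
  simp only [List.mem_map, List.mem_filter, beq_iff_eq]
  constructor
  · rintro ⟨e, ⟨he, h1⟩, h2⟩
    have : e = (a, b) := Prod.ext h1 h2
    rwa [this] at he
  · intro h
    exact ⟨(a, b), ⟨h, rfl⟩, rfl⟩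

theorem pvMem_nodes (edges : List (String × String)) (root : String) (x : String) :
    x ∈ (pvBuildA edges root).1 ↔ x ∈ pvU edges root := by
  rw [pvBuildA_eq]
  have hfold : ∀ (l : List (String × String)) (s : PySem.Set String) (x : String),
      x ∈ l.foldl (fun s e => PySem.Set.add (PySem.Set.add s e.1) e.2) s ↔
        x ∈ s ∨ ∃ e ∈ l, x = e.1 ∨ x = e.2 := by
    intro l
    induction l with
    | nil => simp
    | cons e l ih =>
      intro s x
      simp only [List.foldl_cons, ih, PySem.Set.mem_add, List.mem_cons]
      constructor
      · rintro (((h | h) | h) | ⟨e', he', h⟩)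
        · exact Or.inl h
        · exact Or.inr ⟨e, Or.inl rfl, Or.inl h⟩
        · exact Or.inr ⟨e, Or.inl rfl, Or.inr h⟩
        · exact Or.inr ⟨e', Or.inr he', h⟩
      · rintro (h | ⟨e', he' | he', h⟩)
        · exact Or.inl (Or.inl (Or.inl h))
        · subst he'
          rcases h with h | h
          · exact Or.inl (Or.inl (Or.inr h))
          · exact Or.inl (Or.inr h)
        · exact Or.inr ⟨e', he', h⟩
  rw [hfold]
  simp [pvU, List.mem_flatMap, PySem.Set.mem_ofList]

theorem pvRoot_mem_U (edges : List (String × String)) (root : String) :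
    root ∈ pvU edges root := by
  simp [pvU]

theorem pvStep_mem_U (edges : List (String × String)) (root : String) {a b : String}
    (h : (a, b) ∈ edges) : a ∈ pvU edges root ∧ b ∈ pvU edges root := by
  constructor <;>
  · simp only [pvU, List.mem_toFinset, List.mem_cons, List.mem_flatMap]
    exact Or.inr ⟨(a, b), h, by simp⟩

theorem pvU_card_le (edges : List (String × String)) (root : String) :
    (pvU edges root).card ≤ 2 * edges.length + 1 := by
  have h2 : ∀ (l : List (String × String)),
      (l.flatMap (fun e => [e.1, e.2])).length = 2 * l.length := by
    intro l
    induction l with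
    | nil => simp
    | cons e l ih => simp only [List.flatMap_cons, List.length_append, ih,
        List.length_cons, List.length_nil] ; omega
  unfold pvU
  refine le_trans (List.toFinset_card_le _) ?_
  simp only [List.length_cons, h2]
  omega

-- a set closed under pvStep contains everything reachable from its members
theorem pvReach_closed {edges : List (String × String)} {P : String → Prop}
    (hcl : ∀ a, P a → ∀ b, pvStep edges a b → P b) {s x : String}
    (hs : P s) (h : pvReach edges s x) : P x := by
  induction h with
  | refl => exact hs
  | tail _ hstep ih => exact hcl _ ih _ hstep

-- ---------- closure (port B) ----------

-- membership in the 'new' set of one saturation step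
theorem pvMem_nw (edges : List (String × String)) (root : String)
    (reach : PySem.Set String) (x : String) :
    x ∈ (PySem.Set.ofList
        ((reach.flatMap (fun n => (pvBuildA edges root).2.getD n [])).filter
          (fun c => !(PySem.Set.contains reach c))) : PySem.Set String) ↔
      ((∃ n ∈ reach, (n, x) ∈ edges) ∧ x ∉ reach) := by
  simp only [PySem.Set.mem_ofList, List.mem_filter, List.mem_flatMap, Bool.not_eq_eq_eq_not,
    Bool.not_true, PySem.Set.contains_eq_listContains, List.contains_eq_mem, decide_eq_false_iff_not]
  constructor
  · rintro ⟨⟨n, hn, hx⟩, hnot⟩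
    exact ⟨⟨n, hn, (pvMem_children edges root n x).mp hx⟩, hnot⟩
  · rintro ⟨⟨n, hn, hx⟩, hnot⟩
    exact ⟨⟨n, hn, (pvMem_children edges root n x).mpr hx⟩, hnot⟩

theorem pvClosureB_sub (edges : List (String × String)) (root : String)
    (fuel : Nat) (reach : PySem.Set String) {x : String} (hx : x ∈ reach) :
    x ∈ pvClosureB (pvBuildA edges root).2 fuel reach := by
  induction fuel generalizing reach with
  | zero => exact hx
  | succ fuel ih =>
    rw [pvClosureB]
    split
    · exact hx
    · exact ih _ ((PySem.Set.mem_union _ _ _).mpr (Or.inl hx))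

theorem pvClosureB_sound (edges : List (String × String)) (root : String)
    (fuel : Nat) (reach : PySem.Set String) {x : String}
    (hx : x ∈ pvClosureB (pvBuildA edges root).2 fuel reach) :
    ∃ s ∈ reach, pvReach edges s x := by
  induction fuel generalizing reach with
  | zero => exact ⟨x, hx, Relation.ReflTransGen.refl⟩
  | succ fuel ih =>
    rw [pvClosureB] at hx
    split at hx
    · exact ⟨x, hx, Relation.ReflTransGen.refl⟩
    · rcases ih _ hx with ⟨s, hs, hr⟩
      rcases (PySem.Set.mem_union _ _ _).mp hs with hs | hs
      · exact ⟨s, hs, hr⟩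
      · rcases (pvMem_nw edges root reach s).mp hs with ⟨⟨n, hn, he⟩, _⟩
        exact ⟨n, hn, Relation.ReflTransGen.head he hr⟩

theorem pvClosureB_closed (edges : List (String × String)) (root : String)
    (fuel : Nat) (reach : PySem.Set String)
    (hcard : (((edges.map (fun e => e.2)).toFinset) \ reach.toFinset).card < fuel)
    {a b : String} (ha : a ∈ pvClosureB (pvBuildA edges root).2 fuel reach)
    (hab : (a, b) ∈ edges) :
    b ∈ pvClosureB (pvBuildA edges root).2 fuel reach := by
  induction fuel generalizing reach with
  | zero => omega
  | succ fuel ih =>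
    rw [pvClosureB] at ha ⊢
    split
    case isTrue hemp =>
      rw [if_pos hemp] at ha
      -- saturated: b must already be in reach, else b would be a 'new' element
      by_cases hb : b ∈ reach
      · exact hb
      · exfalso
        have hbnw := (pvMem_nw edges root reach b).mpr ⟨⟨a, ha, hab⟩, hb⟩
        rw [List.isEmpty_iff] at hemp
        rw [hemp] at hbnw
        exact List.not_mem_nil hbnw
    case isFalse hemp =>
      rw [if_neg hemp] at ha
      refine ih _ ?_ ha
      -- the step added at least one missing potential child, so the deficit drops
      have hne := List.exists_mem_of_ne_nil _ (by
        intro h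
        exact hemp (by rw [List.isEmpty_iff]; exact h))
      rcases hne with ⟨w, hw⟩
      rcases (pvMem_nw edges root reach w).mp hw with ⟨⟨n, _, hwe⟩, hwnot⟩
      have hwT : w ∈ (edges.map (fun e => e.2)).toFinset := by
        simp only [List.mem_toFinset, List.mem_map]
        exact ⟨(n, w), hwe, rfl⟩
      have hwdiff : w ∈ (edges.map (fun e => e.2)).toFinset \ reach.toFinset := by
        simp only [Finset.mem_sdiff, List.mem_toFinset]
        exact ⟨by simpa using hwT, hwnot⟩
      have hsub : (edges.map (fun e => e.2)).toFinset \
          (PySem.Set.union reach (PySem.Set.ofList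
            ((reach.flatMap (fun n => (pvBuildA edges root).2.getD n [])).filter
              (fun c => !(PySem.Set.contains reach c))))).toFinset ⊆
          ((edges.map (fun e => e.2)).toFinset \ reach.toFinset).erase w := by
        intro x hx
        simp only [Finset.mem_sdiff, List.mem_toFinset] at hx
        simp only [Finset.mem_erase, Finset.mem_sdiff, List.mem_toFinset]
        refine ⟨?_, hx.1, fun hxr => hx.2 ?_⟩
        · intro hxw
          subst hxw
          exact hx.2 ((PySem.Set.mem_union _ _ _).mpr (Or.inr hw))
        · exact (PySem.Set.mem_union _ _ _).mpr (Or.inl hxr)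
      have hcard2 := Finset.card_le_card hsub
      have herase := Finset.card_erase_of_mem hwdiff
      have hpos : 0 < ((edges.map (fun e => e.2)).toFinset \ reach.toFinset).card :=
        Finset.card_pos.mpr ⟨w, hwdiff⟩
      omega

theorem pvClosureB_iff (edges : List (String × String)) (root : String)
    (l : List String) (x : String) :
    x ∈ pvClosureB (pvBuildA edges root).2 (edges.length + 1) (PySem.Set.ofList l) ↔
      ∃ s ∈ l, pvReach edges s x := by
  constructor
  · intro hx
    rcases pvClosureB_sound edges root _ _ hx with ⟨s, hs, hr⟩
    exact ⟨s, (PySem.Set.mem_ofList _ _).mp hs, hr⟩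
  · rintro ⟨s, hs, hr⟩
    have hcard : (((edges.map (fun e => e.2)).toFinset) \
        (PySem.Set.ofList l : PySem.Set String).toFinset).card < edges.length + 1 := by
      have h1 : (((edges.map (fun e => e.2)).toFinset) \
          (PySem.Set.ofList l : PySem.Set String).toFinset).card ≤
          ((edges.map (fun e => e.2)).toFinset).card :=
        Finset.card_le_card (Finset.sdiff_subset)
      have h2 := List.toFinset_card_le (edges.map (fun e => e.2))
      simp only [List.length_map] at h2
      omega
    have hP := pvReach_closed (edges := edges)
      (P := fun y => y ∈ pvClosureB (pvBuildA edges root).2 (edges.length + 1)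
        (PySem.Set.ofList l))
      (fun a ha b hab => pvClosureB_closed edges root _ _ hcard ha hab)
      (pvClosureB_sub edges root _ _ ((PySem.Set.mem_ofList _ _).mpr hs)) hr
    exact hP

-- characterization of port B
theorem pvAlt_iff (edges : List (String × String)) (root : String) :
    is_tf_consistent_alt edges root = true ↔
      ((∀ x ∈ pvU edges root, pvReach edges root x) ∧
        ∀ n, pvReach edges root n → ¬ pvCyc edges n) := by
  have hroot : ∀ x, x ∈ pvClosureB (pvBuildA edges root).2 (edges.length + 1)
      (PySem.Set.ofList [root]) ↔ pvReach edges root x := by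
    intro x
    rw [pvClosureB_iff]
    simp
  have hcyc : ∀ n, (n ∈ pvClosureB (pvBuildA edges root).2 (edges.length + 1)
      (PySem.Set.ofList ((pvBuildA edges root).2.getD n []))) ↔ pvCyc edges n := by
    intro n
    rw [pvClosureB_iff]
    constructor
    · rintro ⟨c, hc, hr⟩
      exact Relation.TransGen.head'_iff.mpr ⟨c, (pvMem_children _ _ _ _).mp hc, hr⟩
    · intro h
      rcases Relation.TransGen.head'_iff.mp h with ⟨c, hstep, hr⟩
      exact ⟨c, (pvMem_children _ _ _ _).mpr hstep, hr⟩
  simp only [is_tf_consistent_alt]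
  rw [show pvBuildB edges root = pvBuildA edges root from rfl]
  by_cases hsub : PySem.Set.issubset (pvBuildA edges root).1
      (pvClosureB (pvBuildA edges root).2 (edges.length + 1) (PySem.Set.ofList [root])) = true
  · simp only [hsub, Bool.not_true, Bool.false_eq_true, if_false, List.all_eq_true]
    have hsub' := (PySem.Set.issubset_iff _ _).mp hsub
    constructor
    · intro hall
      refine ⟨fun x hx => (hroot x).mp (hsub' x ((pvMem_nodes edges root x).mpr hx)), ?_⟩
      intro n hn hcy
      have hnr : n ∈ pvClosureB (pvBuildA edges root).2 (edges.length + 1)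
          (PySem.Set.ofList [root]) := (hroot n).mpr hn
      have := hall n hnr
      rw [Bool.not_eq_eq_eq_not, Bool.not_true, ← Bool.not_eq_true,
        PySem.Set.contains_iff] at this
      exact this ((hcyc n).mpr hcy)
    · rintro ⟨_, hnc⟩ n hn
      rw [Bool.not_eq_eq_eq_not, Bool.not_true, ← Bool.not_eq_true, PySem.Set.contains_iff]
      intro hmem
      exact hnc n ((hroot n).mp hn) ((hcyc n).mp hmem)
  · rw [Bool.not_eq_true] at hsub
    simp only [hsub, Bool.not_false]
    rw [if_pos trivial]
    simp only [Bool.false_eq_true, false_iff]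
    rintro ⟨hall, -⟩
    refine absurd ?_ (by simp [hsub] : ¬ (PySem.Set.issubset (pvBuildA edges root).1 (pvClosureB (pvBuildA edges root).2 (edges.length + 1) (PySem.Set.ofList [root])) = true))
    apply (PySem.Set.issubset_iff _ _).mpr
    intro x hx
    exact (hroot x).mpr (hall x ((pvMem_nodes edges root x).mp hx))

-- ---------- dfs (port A) ----------

-- conclusions of the dfs specification
def pvConcA (edges : List (String × String)) (vg vd : PySem.Set String) (n : String)
    (r : Bool × PySem.Set String × PySem.Set String) : Prop :=
  (r.1 = true ∧ r.2.1 = vg ∧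
    (∀ x, x ∈ r.2.2 ↔ x ∈ vd ∨ pvReach edges n x) ∧
    (∀ v ∈ vg, ¬ pvReach edges n v) ∧
    (∀ x, pvReach edges n x → ¬ pvCyc edges x)) ∨
  (r.1 = false ∧
    ((∃ v ∈ vg, pvReach edges n v) ∨ ∃ x, pvReach edges n x ∧ pvCyc edges x))

def pvConcL (edges : List (String × String)) (vg vd : PySem.Set String) (cs : List String)
    (r : Bool × PySem.Set String × PySem.Set String) : Prop :=
  (r.1 = true ∧ r.2.1 = vg ∧
    (∀ x, x ∈ r.2.2 ↔ x ∈ vd ∨ ∃ c ∈ cs, pvReach edges c x) ∧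
    (∀ c ∈ cs, (∀ v ∈ vg, ¬ pvReach edges c v) ∧
      ∀ x, pvReach edges c x → ¬ pvCyc edges x)) ∨
  (r.1 = false ∧
    ∃ c ∈ cs, (∃ v ∈ vg, pvReach edges c v) ∨ ∃ x, pvReach edges c x ∧ pvCyc edges x)

theorem pvDiscard_add {vg : PySem.Set String} {n : String} (hn : n ∉ vg) :
    PySem.Set.discard (PySem.Set.add vg n) n = vg := by
  rw [PySem.Set.add_of_not_mem hn]
  show List.filter _ _ = _
  rw [List.filter_append]
  have h1 : vg.filter (fun y => !y == n) = vg :=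
    List.filter_eq_self.mpr (fun y hy => by
      simp only [Bool.not_eq_true', beq_eq_false_iff_ne, ne_eq]
      exact fun h => hn (h ▸ hy))
  have h2 : List.filter (fun y => !y == n) [n] = [] := by simp
  rw [h1, h2, List.append_nil]

-- reachability decomposed at the first step
theorem pvReach_head_iff (edges : List (String × String)) (n x : String) :
    pvReach edges n x ↔ x = n ∨ ∃ c, pvStep edges n c ∧ pvReach edges c x := by
  rw [pvReach, Relation.ReflTransGen.cases_head_iff]
  constructor
  · rintro (h | ⟨c, hs, hr⟩)
    · exact Or.inl h.symm
    · exact Or.inr ⟨c, hs, hr⟩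
  · rintro (h | ⟨c, hs, hr⟩)
    · exact Or.inl h.symm
    · exact Or.inr ⟨c, hs, hr⟩

-- the simultaneous specification of pvDfsA / pvDfsListA, proved by induction on fuel
theorem pvDfs_spec (edges : List (String × String)) (root : String) (fuel : Nat) :
    (∀ (vg vd : PySem.Set String) (n : String),
      vg.Nodup →
      ((pvU edges root) \ vg.toFinset).card < fuel →
      n ∈ pvU edges root →
      (∀ d ∈ vd, ∀ c, pvStep edges d c → c ∈ vd) →
      (∀ d ∈ vd, ¬ pvCyc edges d) →
      (∀ x ∈ vg, x ∉ vd) →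
      pvConcA edges vg vd n (pvDfsA (pvBuildA edges root).2 fuel vg vd n)) ∧
    (∀ (vg vd : PySem.Set String) (cs : List String),
      vg.Nodup →
      ((pvU edges root) \ vg.toFinset).card < fuel →
      (∀ c ∈ cs, c ∈ pvU edges root) →
      (∀ d ∈ vd, ∀ c, pvStep edges d c → c ∈ vd) →
      (∀ d ∈ vd, ¬ pvCyc edges d) →
      (∀ x ∈ vg, x ∉ vd) →
      pvConcL edges vg vd cs (pvDfsListA (pvBuildA edges root).2 fuel vg vd cs)) := by
  induction fuel with
  | zero =>
    refine ⟨?_, ?_⟩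
    · intro vg vd n _ hcard _ _ _ _
      omega
    · intro vg vd cs _ hcard _ _ _ _
      cases cs with
      | nil =>
        simp only [pvDfsListA, pvConcL]
        refine Or.inl ⟨by simp, by simp, by simp, by simp⟩
      | cons c cs => omega
  | succ fuel ih =>
    obtain ⟨ihA, ihL⟩ := ih
    have hA : ∀ (vg vd : PySem.Set String) (n : String),
        vg.Nodup →
        ((pvU edges root) \ vg.toFinset).card < fuel + 1 →
        n ∈ pvU edges root →
        (∀ d ∈ vd, ∀ c, pvStep edges d c → c ∈ vd) →
        (∀ d ∈ vd, ¬ pvCyc edges d) →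
        (∀ x ∈ vg, x ∉ vd) →
        pvConcA edges vg vd n (pvDfsA (pvBuildA edges root).2 (fuel + 1) vg vd n) := by
      intro vg vd n hnd hcard hnU hcl hac hdisj
      simp only [pvDfsA, pvConcA]
      by_cases hvg : PySem.Set.contains vg n = true
      · rw [if_pos hvg]
        exact Or.inr ⟨rfl, Or.inl ⟨n, (PySem.Set.contains_iff _ _).mp hvg,
          Relation.ReflTransGen.refl⟩⟩
      · rw [if_neg hvg]
        have hnn : n ∉ vg := fun h => hvg ((PySem.Set.contains_iff _ _).mpr h)
        by_cases hvd : PySem.Set.contains vd n = true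
        · rw [if_pos hvd]
          have hnvd : n ∈ vd := (PySem.Set.contains_iff _ _).mp hvd
          have hreach_vd : ∀ x, pvReach edges n x → x ∈ vd := fun x hx =>
            pvReach_closed (P := fun y => y ∈ vd) hcl hnvd hx
          refine Or.inl ⟨rfl, rfl, ?_, ?_, ?_⟩
          · intro x
            exact ⟨Or.inl, fun h => h.elim id (hreach_vd x)⟩
          · intro v hv hr
            exact hdisj v hv (hreach_vd v hr)
          · intro x hr
            exact hac x (hreach_vd x hr)
        · rw [if_neg hvd]
          have hnvd : n ∉ vd := fun h => hvd ((PySem.Set.contains_iff _ _).mpr h)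
          have hnd1 : (PySem.Set.add vg n).Nodup := PySem.Set.nodup_add _ _ hnd
          have hcard1 : ((pvU edges root) \ (PySem.Set.add vg n).toFinset).card < fuel := by
            have hsub : (pvU edges root) \ (PySem.Set.add vg n).toFinset =
                ((pvU edges root) \ vg.toFinset).erase n := by
              ext x
              simp only [Finset.mem_sdiff, Finset.mem_erase, List.mem_toFinset,
                PySem.Set.mem_add]
              tauto
            have hmem : n ∈ (pvU edges root) \ vg.toFinset := by
              simp only [Finset.mem_sdiff, List.mem_toFinset]
              exact ⟨hnU, hnn⟩
            rw [hsub, Finset.card_erase_of_mem hmem]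
            have := Finset.card_pos.mpr ⟨n, hmem⟩
            omega
          have hcsU : ∀ c ∈ (pvBuildA edges root).2.getD n [], c ∈ pvU edges root :=
            fun c hc => (pvStep_mem_U edges root ((pvMem_children edges root n c).mp hc)).2
          have hdisj1 : ∀ x ∈ PySem.Set.add vg n, x ∉ vd := by
            intro x hx
            rcases (PySem.Set.mem_add _ _ _).mp hx with h | h
            · exact hdisj x h
            · exact h ▸ hnvd
          have hL := ihL (PySem.Set.add vg n) vd ((pvBuildA edges root).2.getD n [])
            hnd1 hcard1 hcsU hcl hac hdisj1
          rcases hres : pvDfsListA (pvBuildA edges root).2 fuel (PySem.Set.add vg n) vd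
            ((pvBuildA edges root).2.getD n []) with ⟨b, vg2, vd2⟩
          rw [hres] at hL
          simp only [pvConcL] at hL
          cases b with
          | false =>
            rcases hL with ⟨hb, -⟩ | ⟨-, c, hc, hcase⟩
            · exact absurd hb (by simp)
            · refine Or.inr ⟨rfl, ?_⟩
              have hstep : pvStep edges n c := (pvMem_children edges root n c).mp hc
              rcases hcase with ⟨v, hv, hrv⟩ | ⟨x, hrx, hcy⟩
              · rcases (PySem.Set.mem_add _ _ _).mp hv with hv' | hv'
                · exact Or.inl ⟨v, hv', Relation.ReflTransGen.head hstep hrv⟩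
                · refine Or.inr ⟨n, Relation.ReflTransGen.refl, ?_⟩
                  exact Relation.TransGen.head'_iff.mpr ⟨c, hstep, hv' ▸ hrv⟩
              · exact Or.inr ⟨x, Relation.ReflTransGen.head hstep hrx, hcy⟩
          | true =>
            rcases hL with ⟨-, hvg2, hiff, hconds⟩ | ⟨hb, -⟩
            swap
            · exact absurd hb (by simp)
            have hbridge : ∀ x, (∃ c ∈ (pvBuildA edges root).2.getD n [], pvReach edges c x)
                ↔ ∃ c, pvStep edges n c ∧ pvReach edges c x := by
              intro x
              constructor
              · rintro ⟨c, hc, hr⟩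
                exact ⟨c, (pvMem_children edges root n c).mp hc, hr⟩
              · rintro ⟨c, hc, hr⟩
                exact ⟨c, (pvMem_children edges root n c).mpr hc, hr⟩
            refine Or.inl ⟨rfl, ?_, ?_, ?_, ?_⟩
            · rw [hvg2]
              exact pvDiscard_add hnn
            · intro x
              show x ∈ PySem.Set.add vd2 n ↔ _
              rw [PySem.Set.mem_add, hiff x, pvReach_head_iff, hbridge x]
              constructor
              · rintro ((h | h) | h)
                · exact Or.inl h
                · exact Or.inr (Or.inr h)
                · exact Or.inr (Or.inl h)
              · rintro (h | (h | h))
                · exact Or.inl (Or.inl h)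
                · exact Or.inr h
                · exact Or.inl (Or.inr h)
            · intro v hv hr
              rw [pvReach_head_iff] at hr
              rcases hr with h | ⟨c, hstep, hrc⟩
              · exact hnn (h ▸ hv)
              · exact (hconds c ((pvMem_children edges root n c).mpr hstep)).1 v
                  ((PySem.Set.mem_add _ _ _).mpr (Or.inl hv)) hrc
            · intro x hr hcy
              rw [pvReach_head_iff] at hr
              rcases hr with h | ⟨c, hstep, hrc⟩
              · subst h
                rcases Relation.TransGen.head'_iff.mp hcy with ⟨c, hstep, hrcn⟩
                exact (hconds c ((pvMem_children edges root x c).mpr hstep)).1 x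
                  ((PySem.Set.mem_add _ _ _).mpr (Or.inr rfl)) hrcn
              · exact (hconds c ((pvMem_children edges root n c).mpr hstep)).2 x hrc hcy
    refine ⟨hA, ?_⟩
    intro vg vd cs
    induction cs generalizing vd with
    | nil =>
      intro hnd hcard hcsU hcl hac hdisj
      simp only [pvDfsListA, pvConcL]
      refine Or.inl ⟨by simp, by simp, by simp, by simp⟩
    | cons c cs ihcs =>
      intro hnd hcard hcsU hcl hac hdisj
      simp only [pvDfsListA, pvConcL]
      have hAc := hA vg vd c hnd hcard (hcsU c List.mem_cons_self) hcl hac hdisj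
      rcases hr1 : pvDfsA (pvBuildA edges root).2 (fuel + 1) vg vd c with ⟨b1, vgx, vdx⟩
      rw [hr1] at hAc
      simp only [pvConcA] at hAc
      cases b1 with
      | false =>
        rcases hAc with ⟨hb, -⟩ | ⟨-, hreason⟩
        · exact absurd hb (by simp)
        · exact Or.inr ⟨rfl, c, List.mem_cons_self, hreason⟩
      | true =>
        rcases hAc with ⟨-, hvgx, hiff, hnoV, hnoC⟩ | ⟨hb, -⟩
        swap
        · exact absurd hb (by simp)
        rw [hvgx]
        have hcl' : ∀ d ∈ vdx, ∀ e, pvStep edges d e → e ∈ vdx := by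
          intro d hd e hde
          rcases (hiff d).mp hd with h | h
          · exact (hiff e).mpr (Or.inl (hcl d h e hde))
          · exact (hiff e).mpr (Or.inr (Relation.ReflTransGen.tail h hde))
        have hac' : ∀ d ∈ vdx, ¬ pvCyc edges d := by
          intro d hd
          rcases (hiff d).mp hd with h | h
          · exact hac d h
          · exact hnoC d h
        have hdisj' : ∀ x ∈ vg, x ∉ vdx := by
          intro x hx hmem
          rcases (hiff x).mp hmem with h | h
          · exact hdisj x hx h
          · exact hnoV x hx h
        have hrest := ihcs vdx hnd hcard
          (fun c' hc' => hcsU c' (List.mem_cons_of_mem _ hc')) hcl' hac' hdisj'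
        show pvConcL edges vg vd (c :: cs)
          (pvDfsListA (pvBuildA edges root).2 (fuel + 1) vg vdx cs)
        rcases hr2 : pvDfsListA (pvBuildA edges root).2 (fuel + 1) vg vdx cs
          with ⟨b2, vgy, vdy⟩
        rw [hr2] at hrest
        simp only [pvConcL] at hrest
        simp only [pvConcL]
        rcases hrest with ⟨hb2, hvgy, hiff2, hconds2⟩ | ⟨hb2, c', hc', hreason⟩
        · refine Or.inl ⟨hb2, hvgy, ?_, ?_⟩
          · intro x
            have hcons : (∃ a ∈ c :: cs, pvReach edges a x) ↔
                (pvReach edges c x ∨ ∃ a ∈ cs, pvReach edges a x) := by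
              simp
            show x ∈ vdy ↔ _
            rw [hiff2 x, hiff x, hcons]
            constructor
            · rintro ((h | h) | h)
              · exact Or.inl h
              · exact Or.inr (Or.inl h)
              · exact Or.inr (Or.inr h)
            · rintro (h | (h | h))
              · exact Or.inl (Or.inl h)
              · exact Or.inl (Or.inr h)
              · exact Or.inr h
          · intro c' hc'
            rcases List.mem_cons.mp hc' with h | h
            · subst h
              exact ⟨hnoV, hnoC⟩
            · exact hconds2 c' h
        · exact Or.inr ⟨hb2, c', List.mem_cons_of_mem _ hc', hreason⟩

-- characterization of port A
theorem pvA_iff (edges : List (String × String)) (root : String) :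
    is_tf_consistent edges root = true ↔
      ((∀ x ∈ pvU edges root, pvReach edges root x) ∧
        ∀ n, pvReach edges root n → ¬ pvCyc edges n) := by
  obtain ⟨hAspec, -⟩ := pvDfs_spec edges root (2 * edges.length + 2)
  have hcard : ((pvU edges root) \ (PySem.Set.empty : PySem.Set String).toFinset).card <
      2 * edges.length + 2 := by
    have h1 := pvU_card_le edges root
    have h2 : (PySem.Set.empty : PySem.Set String).toFinset = (∅ : Finset String) := rfl
    rw [h2, Finset.sdiff_empty]
    omega
  have h := hAspec PySem.Set.empty PySem.Set.empty root List.nodup_nil hcard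
    (pvRoot_mem_U edges root) (by intro d hd; cases hd) (by intro d hd; cases hd)
    (by intro x hx; cases hx)
  simp only [pvConcA] at h
  simp only [is_tf_consistent]
  rcases hres : pvDfsA (pvBuildA edges root).2 (2 * edges.length + 2)
    PySem.Set.empty PySem.Set.empty root with ⟨b, vg', vd'⟩
  rw [hres] at h
  cases b with
  | true =>
    rcases h with ⟨-, -, hiff, -, hnocyc⟩ | ⟨hb, -⟩
    swap
    · exact absurd hb (by simp)
    have hiff' : ∀ x, x ∈ vd' ↔ pvReach edges root x := by
      intro x
      rw [hiff x]
      constructor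
      · rintro (h | h)
        · cases h
        · exact h
      · exact Or.inr
    rw [if_pos rfl]
    constructor
    · intro hsub
      refine ⟨?_, hnocyc⟩
      intro x hx
      exact (hiff' x).mp ((PySem.Set.issubset_iff _ _).mp hsub x
        ((pvMem_nodes edges root x).mpr hx))
    · rintro ⟨h1, -⟩
      refine (PySem.Set.issubset_iff _ _).mpr ?_
      intro x hx
      exact (hiff' x).mpr (h1 x ((pvMem_nodes edges root x).mp hx))
  | false =>
    rw [if_neg (by simp)]
    simp only [Bool.false_eq_true, false_iff, not_and]
    intro _ h2
    rcases h with ⟨hb, -⟩ | ⟨-, hreason⟩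
    · exact absurd hb (by simp)
    rcases hreason with ⟨v, hv, -⟩ | ⟨x, hrx, hcy⟩
    · cases hv
    · exact h2 x hrx hcy

-- ===== VERDICT (by name: the statement is the Claim_ definition above) =====
theorem is_tf_consistent_spec : Claim_equal_is_tf_consistent := by
  intro edges root _
  unfold Spec_is_tf_consistent
  have hA := pvA_iff edges root
  have hB := pvAlt_iff edges root
  cases hA' : is_tf_consistent edges root with
  | true => exact (hB.mpr (hA.mp hA')).symm
  | false =>
    cases hB' : is_tf_consistent_alt edges root with
    | true => exact absurd (hA.mpr (hB.mp hB')) (by simp [hA'])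
    | false => rfl
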